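-- pv_equiv track=rewrite | github.com/unavailable-2374/Pan_TE | bin/Refiner/phase2_chimera_splitting_improved.py | _cluster_breakpoints
-- ===== SOURCE A (Python) =====
-- from typing import Dict, List, Tuple, Any, Optional
--
-- def _cluster_breakpoints(breakpoints: List[int], tolerance: int) -> List[List[int]]:
--     """聚类相近的断点"""
--     if not breakpoints:
--         return []
--
--     sorted_bp = sorted(breakpoints)
--     clusters = [[sorted_bp[0]]]
--
--     for bp in sorted_bp[1:]:
--         if bp - clusters[-1][-1] <= tolerance:
--             clusters[-1].append(bp)
--         else:
--             clusters.append([bp])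
--
--     return clusters
-- ===== SOURCE B (Python) =====
-- def _cluster_breakpoints(breakpoints, tolerance):
--     """Two-phase clustering: first compute the cut positions (indices where the
--     sorted gap exceeds tolerance), then emit the clusters as slices between
--     consecutive boundaries."""
--     if not breakpoints:
--         return []
--     s = sorted(breakpoints)
--     n = len(s)
--     cuts = [i for i in range(1, n) if s[i] - s[i - 1] > tolerance]
--     bounds = [0] + cuts + [n]
--     return [s[a:b] for a, b in zip(bounds, bounds[1:])]
-- ===== Notes on version B (the rewrite author's own statement) =====
-- stated objective: alternative
-- what changed: B is two-phase: after sorting it first computes the list of cut indices (positions whose gap to the previous element exceeds tolerance) and then materialises each cluster as a slice of the sorted list between consecutive boundaries, instead of A's single incremental pass that appends each element to the last nested cluster or opens a new one.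
import Mathlib
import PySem

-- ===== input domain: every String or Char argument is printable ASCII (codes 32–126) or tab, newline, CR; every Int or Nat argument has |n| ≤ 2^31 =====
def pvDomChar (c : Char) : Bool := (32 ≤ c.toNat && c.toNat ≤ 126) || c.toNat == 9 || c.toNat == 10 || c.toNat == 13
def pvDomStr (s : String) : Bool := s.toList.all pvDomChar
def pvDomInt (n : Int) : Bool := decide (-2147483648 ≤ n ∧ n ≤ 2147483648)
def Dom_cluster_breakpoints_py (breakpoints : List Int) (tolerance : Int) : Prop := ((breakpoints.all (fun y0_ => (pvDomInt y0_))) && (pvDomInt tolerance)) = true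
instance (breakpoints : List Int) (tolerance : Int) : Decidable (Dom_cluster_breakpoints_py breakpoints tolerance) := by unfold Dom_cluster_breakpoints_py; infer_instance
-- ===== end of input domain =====

-- B is two-phase: it computes the cut indices (gap > tolerance) over the sorted
-- list first and then emits each cluster as a slice between consecutive
-- boundaries, instead of A's incremental append-to-last-cluster pass; the
-- return values are proved equal on all inputs (no Pre_ needed).

-- ===== PORT A =====
-- loop body: clusters[-1].append(bp) / clusters.append([bp])
def stepA (tolerance : Int) (clusters : List (List Int)) (bp : Int) : List (List Int) :=
  if bp - PySem.List.pyGetD (PySem.List.pyGetD clusters (-1) []) (-1) 0 ≤ tolerance then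
    clusters.dropLast ++ [PySem.List.pyGetD clusters (-1) [] ++ [bp]]
  else
    clusters ++ [[bp]]

def cluster_breakpoints_py (breakpoints : List Int) (tolerance : Int) : List (List Int) :=
  if breakpoints = [] then []
  else
    let sorted_bp := PySem.List.sorted breakpoints (fun x => x) false
    -- clusters = [[sorted_bp[0]]]; for bp in sorted_bp[1:]: …
    (PySem.List.slice sorted_bp (some 1) none).foldl (stepA tolerance)
      [[PySem.List.pyGetD sorted_bp 0 0]]

-- ===== PORT B =====
-- s[i] is in range for every i drawn from range(1, n), so pyGetD is exact here
def cluster_breakpoints_py_alt (breakpoints : List Int) (tolerance : Int) : List (List Int) :=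
  if breakpoints = [] then []
  else
    let s := PySem.List.sorted breakpoints (fun x => x) false
    let n : Int := s.length
    let cuts := (PySem.List.pyRange 1 n 1).filter
      (fun i => decide (tolerance < PySem.List.pyGetD s i 0 - PySem.List.pyGetD s (i - 1) 0))
    let bounds := 0 :: (cuts ++ [n])
    (bounds.zip bounds.tail).map (fun ab => PySem.List.slice s (some ab.1) (some ab.2))

-- ===== PRECONDITION & SPEC =====
def Spec_cluster_breakpoints_py (breakpoints : List Int) (tolerance : Int) (out : List (List Int)) : Prop := out = cluster_breakpoints_py_alt breakpoints tolerance
instance (breakpoints : List Int) (tolerance : Int) (out : List (List Int)) : Decidable (Spec_cluster_breakpoints_py breakpoints tolerance out) := by unfold Spec_cluster_breakpoints_py; infer_instance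

-- ===== CLAIM (what is proved, stated in full; the proofs are below) =====
def Claim_equal_cluster_breakpoints_py : Prop := ∀ (breakpoints : List Int) (tolerance : Int), Dom_cluster_breakpoints_py breakpoints tolerance → Spec_cluster_breakpoints_py breakpoints tolerance (cluster_breakpoints_py breakpoints tolerance)

-- ===== LEMMAS AND PROOFS =====

/-- Reference grouping: given previous value `v`, split `l` into the tail of the
current cluster and the remaining clusters. -/
def grp (tol : Int) : Int → List Int → List Int × List (List Int)
  | _, [] => ([], [])
  | v, x :: xs =>
    let p := grp tol x xs
    if x - v ≤ tol then (x :: p.1, p.2) else ([], (x :: p.1) :: p.2)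

/-- A's loop, characterised: the last cluster grows by the current-cluster tail of
`grp`, the rest of `grp`'s clusters are appended. -/
theorem foldlA (tol : Int) (l : List Int) :
    ∀ (front : List (List Int)) (c : List Int) (v : Int),
      l.foldl (stepA tol) (front ++ [c ++ [v]]) =
        front ++ ((c ++ [v]) ++ (grp tol v l).1) :: (grp tol v l).2 := by
  induction l with
  | nil => intro front c v; simp [grp]
  | cons bp l ih =>
    intro front c v
    rw [List.foldl_cons]
    have hA : stepA tol (front ++ [c ++ [v]]) bp =
        if bp - v ≤ tol then front ++ [(c ++ [v]) ++ [bp]]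
        else (front ++ [c ++ [v]]) ++ [[bp]] := by
      simp only [stepA, PySem.List.pyGetD_neg_one_append_singleton, List.dropLast_concat]
    by_cases hc : bp - v ≤ tol
    · rw [hA, if_pos hc, ih front (c ++ [v]) bp]
      simp [grp, hc, List.append_assoc]
    · rw [hA, if_neg hc]
      have h2 := ih (front ++ [c ++ [v]]) [] bp
      simp only [List.nil_append] at h2
      rw [h2]
      simp [grp, hc, List.append_assoc]

theorem A_char (breakpoints : List Int) (tol : Int) :
    cluster_breakpoints_py breakpoints tol =
      match PySem.List.sorted breakpoints (fun x => x) false with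
      | [] => []
      | x :: xs => (x :: (grp tol x xs).1) :: (grp tol x xs).2 := by
  unfold cluster_breakpoints_py
  by_cases hb : breakpoints = []
  · subst hb; simp [PySem.List.sorted]
  · simp only [hb, if_neg, not_false_iff]
    cases hs : PySem.List.sorted breakpoints (fun x => x) false with
    | nil => exact absurd ((PySem.List.sorted_eq_nil_iff breakpoints _ false).mp hs) hb
    | cons x xs =>
      rw [PySem.List.slice_from_one, PySem.List.pyGetD_zero_cons, List.tail_cons]
      have h1 := foldlA tol xs [] [] x
      simp only [List.nil_append] at h1
      rw [h1]
      simp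

/-- The boundary list of B, starting the index scan at `k`: cut indices in
`range(k, |s|)` followed by the final boundary `|s|`. -/
def cutsB (tol : Int) (s : List Int) (k : Int) : List Int :=
  (PySem.List.pyRange k s.length 1).filter
    (fun i => decide (tol < PySem.List.pyGetD s i 0 - PySem.List.pyGetD s (i - 1) 0)) ++
    [(s.length : Int)]

/-- The slice chain over a boundary list. -/
def chain (s : List Int) : List Int → List (List Int)
  | a :: b :: rest => PySem.List.slice s (some a) (some b) :: chain s (b :: rest)
  | _ => []

theorem zip_tail_map_eq_chain (s : List Int) (bounds : List Int) :
    (bounds.zip bounds.tail).map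
        (fun ab => PySem.List.slice s (some ab.1) (some ab.2)) = chain s bounds := by
  induction bounds with
  | nil => simp [chain]
  | cons a l ih =>
    cases l with
    | nil => simp [chain]
    | cons b rest => simp only [List.tail_cons, List.zip_cons_cons, List.map_cons, chain]
                     exact congrArg _ ih

/-- Dropping one more element past a known cons. -/
theorem drop_succ_of_drop_cons {s rest : List Int} {a : Nat} {v : Int}
    (h : s.drop a = v :: rest) : s.drop (a + 1) = rest := by
  rw [← List.tail_drop, h]; rfl

theorem pyGetD_of_drop_cons {s rest : List Int} {a : Nat} {v : Int}
    (h : s.drop a = v :: rest) : PySem.List.pyGetD s (a : Int) 0 = v := by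
  rw [PySem.List.pyGetD_natCast]
  have : s[a]? = some v := by rw [← List.head?_drop, h]; rfl
  simp [List.getD, this]

/-- slice s[a:h] = s[a] :: s[a+1:h] when a < h. -/
theorem slice_cons_of_drop {s rest : List Int} {a : Nat} {v : Int} {h : Int}
    (hd : s.drop a = v :: rest) (hlt : (a : Int) < h) :
    PySem.List.slice s (some (a : Int)) (some h) =
      v :: PySem.List.slice s (some ((a : Int) + 1)) (some h) := by
  have h0 : (0 : Int) ≤ h := by omega
  have ha1 : ((a : Int) + 1) = ((a + 1 : Nat) : Int) := by omega
  rw [ha1, PySem.List.slice_toNat s (Int.natCast_nonneg a) h0,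
      PySem.List.slice_toNat s (Int.natCast_nonneg (a + 1)) h0]
  simp only [Int.toNat_natCast]
  rw [hd, drop_succ_of_drop_cons hd]
  have hh : h.toNat - a = (h.toNat - (a + 1)) + 1 := by omega
  rw [hh, List.take_succ_cons]

/-- Main characterisation of B's slice chain against the reference grouping. -/
theorem chainB (tol : Int) (s : List Int) :
    ∀ (rest : List Int) (a : Nat) (v : Int), s.drop a = v :: rest →
      chain s ((a : Int) :: cutsB tol s ((a : Int) + 1)) =
        (v :: (grp tol v rest).1) :: (grp tol v rest).2 := by
  intro rest
  induction rest with
  | nil =>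
    intro a v hd
    have hlen : s.length = a + 1 := by
      have := congrArg List.length hd
      simp [List.length_drop] at this
      omega
    have hr : PySem.List.pyRange ((a : Int) + 1) s.length 1 = [] := by
      rw [PySem.List.pyRange_one]
      have : ((s.length : Int) - ((a : Int) + 1)).toNat = 0 := by omega
      simp [this]
    simp only [cutsB, hr, List.filter_nil, List.nil_append, chain]
    have : PySem.List.slice s (some (a : Int)) (some (s.length : Int)) = [v] := by
      rw [PySem.List.slice_natCast, hd]
      have h1 : s.length - a = 1 := by omega
      simp [h1]
    rw [this]; simp [grp]
  | cons y ys ih =>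
    intro a v hd
    have hrest := drop_succ_of_drop_cons hd
    have hlen : s.length = a + 2 + ys.length := by
      have := congrArg List.length hd
      simp [List.length_drop] at this
      omega
    have hgy : PySem.List.pyGetD s ((a : Int) + 1) 0 = y := by
      have := pyGetD_of_drop_cons hrest
      rwa [Nat.cast_add, Nat.cast_one] at this
    have hgv : PySem.List.pyGetD s (((a : Int) + 1) - 1) 0 = v := by
      simpa using pyGetD_of_drop_cons hd
    have hcons : PySem.List.pyRange ((a : Int) + 1) s.length 1 =
        ((a : Int) + 1) :: PySem.List.pyRange ((a : Int) + 1 + 1) s.length 1 := by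
      apply PySem.List.pyRange_one_cons
      omega
    have ih' := ih (a + 1) y hrest
    rw [Nat.cast_add, Nat.cast_one] at ih'
    by_cases hc : y - v ≤ tol
    · -- no cut at a+1: same boundary list, first slice extended by v
      have hfilter : cutsB tol s ((a : Int) + 1) = cutsB tol s ((a : Int) + 1 + 1) := by
        simp only [cutsB, hcons, List.filter_cons, hgy, hgv]
        have : ¬ tol < y - v := by omega
        simp [this]
      rw [hfilter]
      -- the boundary list is nonempty and its head exceeds a
      have hhead : ∃ h t, cutsB tol s ((a : Int) + 1 + 1) = h :: t ∧ (a : Int) + 1 ≤ h := by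
        cases hf : (PySem.List.pyRange ((a : Int) + 1 + 1) s.length 1).filter
            (fun i => decide (tol < PySem.List.pyGetD s i 0 - PySem.List.pyGetD s (i - 1) 0)) with
        | nil => exact ⟨(s.length : Int), [], by simp [cutsB, hf], by omega⟩
        | cons h t =>
          refine ⟨h, t ++ [(s.length : Int)], by simp [cutsB, hf], ?_⟩
          have hm : h ∈ PySem.List.pyRange ((a : Int) + 1 + 1) s.length 1 :=
            List.mem_of_mem_filter (by rw [hf]; exact List.mem_cons_self)
          have := (PySem.List.mem_pyRange_one.mp hm).1
          omega
      obtain ⟨h, t, hct, hah⟩ := hhead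
      rw [hct] at ih' ⊢
      simp only [chain] at ih' ⊢
      obtain ⟨h1, h2⟩ := List.cons.injEq _ _ _ _ ▸ ih'
      have hsplit := slice_cons_of_drop hd (show (a : Int) < h by omega)
      rw [hsplit, h1, h2]
      simp [grp, hc]
    · -- cut at a+1: close [v], recurse
      have hfilter : cutsB tol s ((a : Int) + 1) =
          ((a : Int) + 1) :: cutsB tol s ((a : Int) + 1 + 1) := by
        simp only [cutsB, hcons, List.filter_cons, hgy, hgv]
        have : tol < y - v := by omega
        simp [this]
      rw [hfilter]
      simp only [chain]
      have hsv : PySem.List.slice s (some (a : Int)) (some ((a : Int) + 1)) = [v] := by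
        have := slice_cons_of_drop hd (show (a : Int) < (a : Int) + 1 by omega)
        rw [this]
        have ha1 : ((a : Int) + 1) = ((a + 1 : Nat) : Int) := by omega
        rw [ha1, PySem.List.slice_natCast]
        simp
      rw [hsv, ih']
      simp [grp, hc]

theorem B_char (breakpoints : List Int) (tol : Int) :
    cluster_breakpoints_py_alt breakpoints tol =
      match PySem.List.sorted breakpoints (fun x => x) false with
      | [] => []
      | x :: xs => (x :: (grp tol x xs).1) :: (grp tol x xs).2 := by
  unfold cluster_breakpoints_py_alt
  by_cases hb : breakpoints = []
  · subst hb; simp [PySem.List.sorted]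
  · simp only [hb, if_neg, not_false_iff]
    cases hs : PySem.List.sorted breakpoints (fun x => x) false with
    | nil => exact absurd ((PySem.List.sorted_eq_nil_iff breakpoints _ false).mp hs) hb
    | cons x xs =>
      rw [zip_tail_map_eq_chain]
      have h0 := chainB tol (x :: xs) xs 0 x (by simp)
      simp only [Nat.cast_zero, zero_add] at h0
      -- the port's bounds list is exactly 0 :: cutsB tol (x :: xs) 1
      simpa [cutsB] using h0

-- ===== VERDICT (by name: the statement is the Claim_ definition above) =====
theorem cluster_breakpoints_py_spec : Claim_equal_cluster_breakpoints_py := by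
  intro breakpoints tolerance _
  unfold Spec_cluster_breakpoints_py
  rw [A_char, B_char]
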